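-- pv_equiv track=rewrite | github.com/SebastianVintonuke/TDA-Test | backtracking/sudoku.py | posibilidades_de_en
-- ===== SOURCE A (Python) =====
-- POSIBILIDADES = [1,2,3,4,5,6,7,8,9]
--
-- def posibilidades_de_en(casilla, matriz):
--     fila, columna = casilla
--     posibilidades = set(POSIBILIDADES)
--     # Verificar por fila y columna
--     for i in range(len(matriz)):
--         posibilidades.discard(matriz[i][columna])
--         posibilidades.discard(matriz[fila][i])
--     # Verificar por esquinas de cuadrante
--     centro_fila = ((fila // 3) * 3) + 1
--     centro_columna = ((columna // 3) * 3) + 1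
--     posibilidades.discard(matriz[centro_fila - 1][centro_columna - 1])
--     posibilidades.discard(matriz[centro_fila - 1][centro_columna])
--     posibilidades.discard(matriz[centro_fila - 1][centro_columna + 1])
--     posibilidades.discard(matriz[centro_fila][centro_columna - 1])
--     posibilidades.discard(matriz[centro_fila][centro_columna])
--     posibilidades.discard(matriz[centro_fila][centro_columna + 1])
--     posibilidades.discard(matriz[centro_fila + 1][centro_columna - 1])
--     posibilidades.discard(matriz[centro_fila + 1][centro_columna])
--     posibilidades.discard(matriz[centro_fila + 1][centro_columna + 1])
--     return posibilidades
-- ===== SOURCE B (Python) =====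
-- POSIBILIDADES = [1, 2, 3, 4, 5, 6, 7, 8, 9]
--
-- def posibilidades_de_en(casilla, matriz):
--     # Candidate-driven: instead of maintaining any set of seen/remaining values,
--     # test each digit independently against the row, the column and the block.
--     fila, columna = casilla
--     n = len(matriz)
--     r0 = (fila // 3) * 3
--     c0 = (columna // 3) * 3
--
--     def prohibido(d):
--         return (any(matriz[i][columna] == d for i in range(n))
--                 or any(matriz[fila][i] == d for i in range(n))
--                 or any(matriz[r0 + k // 3][c0 + k % 3] == d for k in range(9)))
--
--     return {d for d in POSIBILIDADES if not prohibido(d)}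
-- ===== Notes on version B (the rewrite author's own statement) =====
-- stated objective: alternative
-- what changed: B is candidate-driven: it maintains no set of seen or remaining values at all; for each digit 1..9 it independently tests with any() whether the digit occurs in the row, the column or the (linearised k//3,k%3) block, and keeps the digits for which no test fires.
import Mathlib
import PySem

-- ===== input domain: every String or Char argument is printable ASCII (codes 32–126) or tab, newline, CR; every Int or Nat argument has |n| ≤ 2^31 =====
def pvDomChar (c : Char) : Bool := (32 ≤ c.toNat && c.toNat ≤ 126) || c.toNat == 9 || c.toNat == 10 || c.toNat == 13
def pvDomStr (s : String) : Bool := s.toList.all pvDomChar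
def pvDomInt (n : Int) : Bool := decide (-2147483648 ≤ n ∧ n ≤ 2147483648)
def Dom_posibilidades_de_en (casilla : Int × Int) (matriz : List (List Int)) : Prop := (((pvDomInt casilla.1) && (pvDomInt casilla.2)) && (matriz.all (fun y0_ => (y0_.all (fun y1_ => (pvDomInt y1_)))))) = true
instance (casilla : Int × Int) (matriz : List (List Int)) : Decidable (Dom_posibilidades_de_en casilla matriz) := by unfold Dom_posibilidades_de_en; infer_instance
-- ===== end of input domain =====

-- B is candidate-driven: it keeps no set of seen/remaining values; each digit 1..9 is
-- independently tested with any() against the row, the column and the linearised block.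
-- Equivalence of the RETURN value (a Python set, order-insensitive).

-- matriz[r][c] as both Pythons index it (total form; Pre_ guarantees all accesses in range)
def pvCell (matriz : List (List Int)) (r c : Int) : Int :=
  PySem.List.pyGetD (PySem.List.pyGetD matriz r []) c 0

-- ===== PORT A =====
def posibilidades_de_en (casilla : Int × Int) (matriz : List (List Int)) : List Int :=
  let fila := casilla.1
  let columna := casilla.2
  let posibilidades : PySem.Set Int := PySem.Set.ofList [1,2,3,4,5,6,7,8,9]
  let posibilidades :=
    (PySem.List.pyRange 0 (matriz.length : Int) 1).foldl
      (fun p i =>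
        let p := PySem.Set.discard p (pvCell matriz i columna)
        PySem.Set.discard p (pvCell matriz fila i)) posibilidades
  let centro_fila := PySem.Int.floordiv fila 3 * 3 + 1
  let centro_columna := PySem.Int.floordiv columna 3 * 3 + 1
  let p := posibilidades
  let p := PySem.Set.discard p (pvCell matriz (centro_fila - 1) (centro_columna - 1))
  let p := PySem.Set.discard p (pvCell matriz (centro_fila - 1) centro_columna)
  let p := PySem.Set.discard p (pvCell matriz (centro_fila - 1) (centro_columna + 1))
  let p := PySem.Set.discard p (pvCell matriz centro_fila (centro_columna - 1))
  let p := PySem.Set.discard p (pvCell matriz centro_fila centro_columna)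
  let p := PySem.Set.discard p (pvCell matriz centro_fila (centro_columna + 1))
  let p := PySem.Set.discard p (pvCell matriz (centro_fila + 1) (centro_columna - 1))
  let p := PySem.Set.discard p (pvCell matriz (centro_fila + 1) centro_columna)
  let p := PySem.Set.discard p (pvCell matriz (centro_fila + 1) (centro_columna + 1))
  p

-- ===== PORT B =====
def posibilidades_de_en_alt (casilla : Int × Int) (matriz : List (List Int)) : List Int :=
  let fila := casilla.1
  let columna := casilla.2
  let n := (matriz.length : Int)
  let r0 := PySem.Int.floordiv fila 3 * 3
  let c0 := PySem.Int.floordiv columna 3 * 3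
  let prohibido := fun (d : Int) =>
    (PySem.List.pyRange 0 n 1).any (fun i => pvCell matriz i columna == d) ||
    (PySem.List.pyRange 0 n 1).any (fun i => pvCell matriz fila i == d) ||
    (PySem.List.pyRange 0 9 1).any
      (fun k => pvCell matriz (r0 + PySem.Int.floordiv k 3) (c0 + PySem.Int.mod k 3) == d)
  PySem.Set.ofList ([1,2,3,4,5,6,7,8,9].filter (fun d => !prohibido d))

-- ===== PRECONDITION & SPEC =====
-- Pre_ = exactly the inputs on which the Python A returns (every index in range; A raises IndexError otherwise)
def Pre_posibilidades_de_en (casilla : Int × Int) (matriz : List (List Int)) : Prop :=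
  PySem.Raise.InRange matriz.length casilla.1 ∧
  (∀ row ∈ matriz, PySem.Raise.InRange row.length casilla.2) ∧
  matriz.length ≤ (PySem.List.pyGetD matriz casilla.1 []).length ∧
  (∀ r ∈ [PySem.Int.floordiv casilla.1 3 * 3, PySem.Int.floordiv casilla.1 3 * 3 + 1,
          PySem.Int.floordiv casilla.1 3 * 3 + 2],
    PySem.Raise.InRange matriz.length r ∧
    ∀ c ∈ [PySem.Int.floordiv casilla.2 3 * 3, PySem.Int.floordiv casilla.2 3 * 3 + 1,
           PySem.Int.floordiv casilla.2 3 * 3 + 2],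
      PySem.Raise.InRange (PySem.List.pyGetD matriz r []).length c)
instance (casilla : Int × Int) (matriz : List (List Int)) : Decidable (Pre_posibilidades_de_en casilla matriz) := by unfold Pre_posibilidades_de_en; infer_instance

def pvWitness_posibilidades_de_en : (Int × Int) × List (List Int) :=
  ((4, 4),
   [[0,0,0,0,0,0,0,0,0],[0,0,0,0,0,0,0,0,0],[0,0,0,0,0,0,0,0,0],
    [0,0,0,0,0,0,0,0,0],[0,1,0,0,2,0,0,0,0],[0,0,0,0,0,0,0,0,0],
    [0,0,0,0,0,0,0,0,0],[0,0,0,0,0,0,0,0,0],[0,0,0,0,0,0,0,0,0]])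

def Spec_posibilidades_de_en (casilla : Int × Int) (matriz : List (List Int)) (out : List Int) : Prop := out = posibilidades_de_en_alt casilla matriz
instance (casilla : Int × Int) (matriz : List (List Int)) (out : List Int) : Decidable (Spec_posibilidades_de_en casilla matriz out) := by unfold Spec_posibilidades_de_en; infer_instance

-- ===== CLAIM (what is proved, stated in full; the proofs are below) =====
def Claim_equal_posibilidades_de_en : Prop := ∀ (casilla : Int × Int) (matriz : List (List Int)), Dom_posibilidades_de_en casilla matriz → Pre_posibilidades_de_en casilla matriz → Spec_posibilidades_de_en casilla matriz (posibilidades_de_en casilla matriz)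

-- ===== LEMMAS AND PROOFS =====

-- every value A removes, as one flat list (loop part, then block row-major)
def pvVals (casilla : Int × Int) (matriz : List (List Int)) : List Int :=
  let fila := casilla.1
  let columna := casilla.2
  let r0 := PySem.Int.floordiv fila 3 * 3
  let c0 := PySem.Int.floordiv columna 3 * 3
  ((PySem.List.pyRange 0 (matriz.length : Int) 1).flatMap
      (fun i => [pvCell matriz i columna, pvCell matriz fila i])) ++
  [pvCell matriz r0 c0, pvCell matriz r0 (c0 + 1), pvCell matriz r0 (c0 + 2),
   pvCell matriz (r0 + 1) c0, pvCell matriz (r0 + 1) (c0 + 1), pvCell matriz (r0 + 1) (c0 + 2),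
   pvCell matriz (r0 + 2) c0, pvCell matriz (r0 + 2) (c0 + 1), pvCell matriz (r0 + 2) (c0 + 2)]

theorem foldl_discard_eq_filter (vs s : List Int) :
    vs.foldl PySem.Set.discard s = s.filter (fun x => !vs.contains x) := by
  induction vs generalizing s with
  | nil => simp
  | cons v vs ih =>
      simp only [List.foldl_cons, ih, PySem.Set.discard, List.filter_filter]
      apply List.filter_congr
      intro x _
      by_cases h : x = v <;> simp [h]

theorem foldl_pair_eq_flatMap {α : Type} (l : List α) (f g : α → Int)
    (op : List Int → Int → List Int) (s : List Int) :
    l.foldl (fun p i => op (op p (f i)) (g i)) s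
      = (l.flatMap (fun i => [f i, g i])).foldl op s := by
  induction l generalizing s with
  | nil => rfl
  | cons a l ih => simp [List.foldl_cons, ih]

theorem discard9 (p : List Int) (a b c d e f g h i : Int) :
    PySem.Set.discard (PySem.Set.discard (PySem.Set.discard (PySem.Set.discard
      (PySem.Set.discard (PySem.Set.discard (PySem.Set.discard (PySem.Set.discard
        (PySem.Set.discard p a) b) c) d) e) f) g) h) i
      = [a,b,c,d,e,f,g,h,i].foldl PySem.Set.discard p := by
  simp only [List.foldl_cons, List.foldl_nil]

theorem A_eq_filter (casilla : Int × Int) (matriz : List (List Int)) :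
    posibilidades_de_en casilla matriz
      = [1,2,3,4,5,6,7,8,9].filter (fun x => !(pvVals casilla matriz).contains x) := by
  have e1 : ∀ q : Int, q * 3 + 1 - 1 = q * 3 := by intro q; ring
  have e2 : ∀ q : Int, q * 3 + 1 + 1 = q * 3 + 2 := by intro q; ring
  unfold posibilidades_de_en pvVals
  simp only [e1, e2]
  rw [foldl_pair_eq_flatMap]
  rw [show (PySem.Set.ofList [1,2,3,4,5,6,7,8,9] : List Int) = [1,2,3,4,5,6,7,8,9] from by decide]
  rw [discard9, ← List.foldl_append, foldl_discard_eq_filter]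

theorem contains_pvVals (casilla : Int × Int) (matriz : List (List Int)) (d : Int) :
    (pvVals casilla matriz).contains d
      = ((PySem.List.pyRange 0 (matriz.length : Int) 1).any
            (fun i => pvCell matriz i casilla.2 == d) ||
         (PySem.List.pyRange 0 (matriz.length : Int) 1).any
            (fun i => pvCell matriz casilla.1 i == d) ||
         (PySem.List.pyRange 0 9 1).any
            (fun k => pvCell matriz (PySem.Int.floordiv casilla.1 3 * 3 + PySem.Int.floordiv k 3)
                                    (PySem.Int.floordiv casilla.2 3 * 3 + PySem.Int.mod k 3) == d)) := by
  rw [show PySem.List.pyRange 0 9 1 = [0,1,2,3,4,5,6,7,8] from by decide]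
  unfold pvVals
  simp only [List.any_cons, List.any_nil,
    show PySem.Int.floordiv (0:Int) 3 = 0 from by decide,
    show PySem.Int.floordiv (1:Int) 3 = 0 from by decide,
    show PySem.Int.floordiv (2:Int) 3 = 0 from by decide,
    show PySem.Int.floordiv (3:Int) 3 = 1 from by decide,
    show PySem.Int.floordiv (4:Int) 3 = 1 from by decide,
    show PySem.Int.floordiv (5:Int) 3 = 1 from by decide,
    show PySem.Int.floordiv (6:Int) 3 = 2 from by decide,
    show PySem.Int.floordiv (7:Int) 3 = 2 from by decide,
    show PySem.Int.floordiv (8:Int) 3 = 2 from by decide,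
    show PySem.Int.mod (0:Int) 3 = 0 from by decide,
    show PySem.Int.mod (1:Int) 3 = 1 from by decide,
    show PySem.Int.mod (2:Int) 3 = 2 from by decide,
    show PySem.Int.mod (3:Int) 3 = 0 from by decide,
    show PySem.Int.mod (4:Int) 3 = 1 from by decide,
    show PySem.Int.mod (5:Int) 3 = 2 from by decide,
    show PySem.Int.mod (6:Int) 3 = 0 from by decide,
    show PySem.Int.mod (7:Int) 3 = 1 from by decide,
    show PySem.Int.mod (8:Int) 3 = 2 from by decide]
  rw [Bool.eq_iff_iff]
  simp only [List.contains_eq_mem, List.mem_append, List.mem_flatMap, List.mem_cons,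
    List.not_mem_nil, or_false, List.any_eq_true, Bool.or_eq_true, beq_iff_eq,
    add_zero, and_or_left, exists_or, @eq_comm _ d,
    decide_eq_true_eq, Bool.false_eq_true, or_false]

theorem B_eq_filter (casilla : Int × Int) (matriz : List (List Int)) :
    posibilidades_de_en_alt casilla matriz
      = [1,2,3,4,5,6,7,8,9].filter (fun x => !(pvVals casilla matriz).contains x) := by
  unfold posibilidades_de_en_alt
  dsimp only
  rw [PySem.Set.ofList_eq_self_of_nodup _ (List.Nodup.filter _ (by decide))]
  apply List.filter_congr
  intro d _
  rw [contains_pvVals]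

-- ===== VERDICT (by name: the statement is the Claim_ definition above) =====
theorem posibilidades_de_en_spec : Claim_equal_posibilidades_de_en := by
  intro casilla matriz _ _
  unfold Spec_posibilidades_de_en
  rw [A_eq_filter, B_eq_filter]
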